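-- pv_equiv track=rewrite | github.com/pypi-data/pypi-mirror-400 | packages/domolibrary2/domolibrary2-2.3.1-py3-none-any.whl/postman/migration/utils.py | format_code_examples
-- ===== SOURCE A (Python) =====
-- def format_code_examples(examples: list[str], max_length: int = 2000) -> str:
--     """Format code examples for inclusion in prompts.
--
--     Args:
--         examples: List of code example strings
--         max_length: Maximum total length
--
--     Returns:
--         Formatted string with examples
--     """
--     if not examples:
--         return ""
--
--     formatted = []
--     current_length = 0
--
--     for i, example in enumerate(examples):
--         if current_length + len(example) > max_length:
--             break
--
--         formatted.append(f"Example {i + 1}:\n```python\n{example[:1000]}\n```\n")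
--         current_length += len(example)
--
--     return "\n".join(formatted)
-- ===== SOURCE B (Python) =====
-- from itertools import accumulate
-- from bisect import bisect_right
--
--
-- def format_code_examples(examples: list[str], max_length: int = 2000) -> str:
--     """Format code examples for inclusion in prompts (prefix-table + bisect version)."""
--     cum = list(accumulate(len(e) for e in examples))
--     count = bisect_right(cum, max_length)
--     return "\n".join(
--         f"Example {i + 1}:\n```python\n{examples[i][:1000]}\n```\n"
--         for i in range(count)
--     )
-- ===== Notes on version B (the rewrite author's own statement) =====
-- stated objective: alternative
-- what changed: Replaces the accumulating loop with early break by a cumulative-length prefix table plus a bisect_right cutoff (valid because lengths are non-negative, so the running total is monotone) and a formatting comprehension over the kept prefix.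
import Mathlib
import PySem

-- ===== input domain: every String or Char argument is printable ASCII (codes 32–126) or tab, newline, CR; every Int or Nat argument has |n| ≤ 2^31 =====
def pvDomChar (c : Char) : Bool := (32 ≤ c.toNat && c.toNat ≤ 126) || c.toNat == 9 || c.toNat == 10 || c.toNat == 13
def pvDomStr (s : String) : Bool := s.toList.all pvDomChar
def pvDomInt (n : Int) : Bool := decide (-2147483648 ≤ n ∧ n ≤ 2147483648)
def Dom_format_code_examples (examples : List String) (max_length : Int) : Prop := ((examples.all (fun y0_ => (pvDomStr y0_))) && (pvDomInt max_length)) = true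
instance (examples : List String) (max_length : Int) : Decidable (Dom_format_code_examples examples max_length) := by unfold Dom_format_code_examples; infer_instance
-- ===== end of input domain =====

-- B replaces A's accumulating loop with early break by a cumulative-length prefix table
-- plus a bisect_right cutoff and a formatting pass over the kept prefix (alternative decomposition, same cost).

-- shared formatting helper: the f-string "Example {i+1}:\n```python\n{example[:1000]}\n```\n" (identical in A and B)
def pvFmt (i : Nat) (e : String) : String :=
  "Example " ++ PySem.Int.toStr ((i : Int) + 1) ++ ":\n```python\n" ++ PySem.Str.slice e none (some 1000) ++ "\n```\n"

-- ===== PORT A =====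
-- the for-loop with enumerate, running total and break
def pvLoopA (es : List String) (i : Nat) (cur : Int) (ml : Int) : List String :=
  match es with
  | [] => []
  | e :: rest =>
    if cur + PySem.Str.len e > ml then []
    else pvFmt i e :: pvLoopA rest (i + 1) (cur + PySem.Str.len e) ml

def format_code_examples (examples : List String) (max_length : Int) : String :=
  if examples = [] then ""
  else PySem.Str.join "\n" (pvLoopA examples 0 0 max_length)

-- ===== PORT B =====
-- itertools.accumulate(len(e) for e in examples)
def pvAccum (xs : List Int) (s : Int) : List Int :=
  match xs with
  | [] => []
  | x :: r => (s + x) :: pvAccum r (s + x)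

-- bisect.bisect_right(a, x) : binary search, lo=0, hi=len(a)
def pvBisectRight (a : List Int) (x : Int) (lo hi : Nat) : Nat :=
  if lo < hi then
    let mid := (lo + hi) / 2
    if x < a.getD mid 0 then pvBisectRight a x lo mid
    else pvBisectRight a x (mid + 1) hi
  else lo
termination_by hi - lo
decreasing_by all_goals omega

def format_code_examples_alt (examples : List String) (max_length : Int) : String :=
  let cum := pvAccum (examples.map (fun e => PySem.Str.len e)) 0
  let count := pvBisectRight cum max_length 0 cum.length
  PySem.Str.join "\n" ((List.range count).map (fun i => pvFmt i (examples.getD i "")))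

-- ===== PRECONDITION & SPEC =====
def Spec_format_code_examples (examples : List String) (max_length : Int) (out : String) : Prop := out = format_code_examples_alt examples max_length
instance (examples : List String) (max_length : Int) (out : String) : Decidable (Spec_format_code_examples examples max_length out) := by unfold Spec_format_code_examples; infer_instance

-- ===== CLAIM (what is proved, stated in full; the proofs are below) =====
def Claim_equal_format_code_examples : Prop := ∀ (examples : List String) (max_length : Int), Dom_format_code_examples examples max_length → Spec_format_code_examples examples max_length (format_code_examples examples max_length)

-- ===== LEMMAS AND PROOFS =====

-- index of the first cumulative sum exceeding x (= number of kept examples)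
def pvFirst (a : List Int) (x : Int) : Nat :=
  match a with
  | [] => 0
  | v :: r => if v ≤ x then pvFirst r x + 1 else 0

theorem pvFirst_le_length (a : List Int) (x : Int) : pvFirst a x ≤ a.length := by
  induction a with
  | nil => simp [pvFirst]
  | cons v r ih => simp only [pvFirst, List.length_cons]; split <;> omega

theorem pvFirst_below (a : List Int) (x : Int) :
    ∀ j, j < pvFirst a x → a.getD j 0 ≤ x := by
  induction a with
  | nil => intro j h; simp [pvFirst] at h
  | cons v r ih =>
    intro j h
    simp only [pvFirst] at h
    split at h
    · cases j with
      | zero => simpa using ‹v ≤ x›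
      | succ j' => simpa using ih j' (by omega)
    · omega

theorem pvAccum_ge (xs : List Int) (s : Int) (hnn : ∀ v ∈ xs, 0 ≤ v) :
    ∀ j, j < (pvAccum xs s).length → s ≤ (pvAccum xs s).getD j 0 := by
  induction xs generalizing s with
  | nil => intro j h; simp [pvAccum] at h
  | cons v r ih =>
    intro j h
    have hv : 0 ≤ v := hnn v (by simp)
    cases j with
    | zero => simp only [pvAccum, List.getD_cons_zero]; omega
    | succ j' =>
      simp only [pvAccum, List.length_cons] at h
      have := ih (s + v) (fun w hw => hnn w (by simp [hw])) j' (by omega)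
      simp only [pvAccum, List.getD_cons_succ]
      omega

theorem pvFirst_above (xs : List Int) (s : Int) (x : Int) (hnn : ∀ v ∈ xs, 0 ≤ v) :
    ∀ j, pvFirst (pvAccum xs s) x ≤ j → j < (pvAccum xs s).length →
      x < (pvAccum xs s).getD j 0 := by
  induction xs generalizing s with
  | nil => intro j _ h; simp [pvAccum] at h
  | cons v r ih =>
    intro j hj hlen
    simp only [pvAccum, pvFirst, List.length_cons] at hj hlen ⊢
    split at hj
    · -- s + v ≤ x : head kept, recurse on the tail
      cases j with
      | zero => omega
      | succ j' =>
        simpa using ih (s + v) (fun w hw => hnn w (by simp [hw])) j' (by omega) (by omega)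
    · -- s + v > x : every later sum is ≥ s + v > x
      cases j with
      | zero => simp only [List.getD_cons_zero]; omega
      | succ j' =>
        have := pvAccum_ge r (s + v) (fun w hw => hnn w (by simp [hw])) j' (by omega)
        simp only [List.getD_cons_succ]
        omega

theorem pvBisect_eq (a : List Int) (x : Int) (k : Nat)
    (hk : k ≤ a.length)
    (hb : ∀ j, j < k → a.getD j 0 ≤ x)
    (ha : ∀ j, k ≤ j → j < a.length → x < a.getD j 0)
    (lo hi : Nat) (h1 : lo ≤ k) (h2 : k ≤ hi) (h3 : hi ≤ a.length) :
    pvBisectRight a x lo hi = k := by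
  rw [pvBisectRight]
  split
  · rename_i hlt
    simp only
    split
    · rename_i hmid
      have hkm : k ≤ (lo + hi) / 2 := by
        by_contra hc
        exact absurd (hb ((lo + hi) / 2) (by omega)) (by omega)
      exact pvBisect_eq a x k hk hb ha lo ((lo + hi) / 2) h1 hkm (by omega)
    · rename_i hmid
      have hkm : (lo + hi) / 2 + 1 ≤ k := by
        by_contra hc
        exact absurd (ha ((lo + hi) / 2) (by omega) (by omega)) (by omega)
      exact pvBisect_eq a x k hk hb ha ((lo + hi) / 2 + 1) hi hkm h2 h3
  · omega
termination_by hi - lo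
decreasing_by all_goals omega

-- A's loop produces exactly the formatted prefix of length pvFirst (pvAccum lens cur) ml
theorem pvLoopA_eq (ml : Int) :
    ∀ (es : List String) (i : Nat) (cur : Int),
      pvLoopA es i cur ml =
        (List.range (pvFirst (pvAccum (es.map (fun e => PySem.Str.len e)) cur) ml)).map
          (fun j => pvFmt (i + j) (es.getD j "")) := by
  intro es
  induction es with
  | nil => intro i cur; simp [pvLoopA, pvAccum, pvFirst]
  | cons e rest ih =>
    intro i cur
    simp only [pvLoopA, List.map_cons, pvAccum, pvFirst]
    by_cases h : cur + PySem.Str.len e ≤ ml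
    · rw [if_neg (by omega), if_pos h, List.range_succ_eq_map, List.map_cons]
      refine congrArg₂ _ (by simp) ?_
      rw [ih (i + 1) (cur + PySem.Str.len e), List.map_map]
      refine List.map_congr_left (fun j _ => ?_)
      simp only [Function.comp]
      have : i + (j + 1) = i + 1 + j := by omega
      simp [this]
    · rw [if_pos (by omega), if_neg h, List.range_zero, List.map_nil]

theorem pvCount_eq (es : List String) (ml : Int) :
    pvBisectRight (pvAccum (es.map (fun e => PySem.Str.len e)) 0) ml 0
        (pvAccum (es.map (fun e => PySem.Str.len e)) 0).length =
      pvFirst (pvAccum (es.map (fun e => PySem.Str.len e)) 0) ml := by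
  have hnn : ∀ v ∈ es.map (fun e => PySem.Str.len e), 0 ≤ v := by
    intro v hv
    simp only [List.mem_map] at hv
    obtain ⟨e, _, rfl⟩ := hv
    simp [PySem.Str.len]
  exact pvBisect_eq _ ml _ (pvFirst_le_length _ ml) (pvFirst_below _ ml)
    (pvFirst_above _ 0 ml hnn) 0 _ (Nat.zero_le _) (pvFirst_le_length _ ml) le_rfl

-- ===== VERDICT (by name: the statement is the Claim_ definition above) =====
theorem format_code_examples_spec : Claim_equal_format_code_examples := by
  intro examples max_length _
  unfold Spec_format_code_examples format_code_examples format_code_examples_alt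
  simp only [pvCount_eq]
  split
  · rename_i h
    subst h
    simp only [List.map_nil, pvAccum, pvFirst, List.range_zero]
    decide
  · rw [pvLoopA_eq]
    refine congrArg _ (List.map_congr_left (fun j _ => by simp))
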